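-- pv_equiv track=rewrite | github.com/patrick-g-22/geopolitical-risk-dashboard | main.py | sum_cast_forecasts
-- ===== SOURCE A (Python) =====
-- def sum_cast_forecasts(cast_data):
--     total = battles = erv = vac = 0; countries = {}
--     for row in cast_data:
--         try: t, b, e, v = int(row.get("total_forecast", 0) or 0), int(row.get("battles_forecast", 0) or 0), int(row.get("erv_forecast", 0) or 0), int(row.get("vac_forecast", 0) or 0)
--         except: continue
--         total += t; battles += b; erv += e; vac += v
--         c = row.get("country", "Unknown")
--         if c not in countries: countries[c] = {"total": 0, "battles": 0, "erv": 0, "vac": 0}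
--         countries[c]["total"] += t; countries[c]["battles"] += b; countries[c]["erv"] += e; countries[c]["vac"] += v
--     return total, battles, erv, vac, countries
-- ===== SOURCE B (Python) =====
-- def sum_cast_forecasts(cast_data):
--     countries = {}
--     for row in cast_data:
--         try:
--             t = int(row.get("total_forecast", 0) or 0)
--             b = int(row.get("battles_forecast", 0) or 0)
--             e = int(row.get("erv_forecast", 0) or 0)
--             v = int(row.get("vac_forecast", 0) or 0)
--         except Exception:
--             continue
--         c = row.get("country", "Unknown")
--         bucket = countries.setdefault(c, {"total": 0, "battles": 0, "erv": 0, "vac": 0})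
--         bucket["total"] += t
--         bucket["battles"] += b
--         bucket["erv"] += e
--         bucket["vac"] += v
--     total = sum(b["total"] for b in countries.values())
--     battles = sum(b["battles"] for b in countries.values())
--     erv = sum(b["erv"] for b in countries.values())
--     vac = sum(b["vac"] for b in countries.values())
--     return total, battles, erv, vac, countries
-- ===== Notes on version B (the rewrite author's own statement) =====
-- stated objective: simpler
-- what changed: The loop now maintains only the per-country buckets (via setdefault); the four overall totals are derived afterwards by a second pass summing each field across countries.values(), instead of being accumulated alongside the dict.
import Mathlib
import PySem

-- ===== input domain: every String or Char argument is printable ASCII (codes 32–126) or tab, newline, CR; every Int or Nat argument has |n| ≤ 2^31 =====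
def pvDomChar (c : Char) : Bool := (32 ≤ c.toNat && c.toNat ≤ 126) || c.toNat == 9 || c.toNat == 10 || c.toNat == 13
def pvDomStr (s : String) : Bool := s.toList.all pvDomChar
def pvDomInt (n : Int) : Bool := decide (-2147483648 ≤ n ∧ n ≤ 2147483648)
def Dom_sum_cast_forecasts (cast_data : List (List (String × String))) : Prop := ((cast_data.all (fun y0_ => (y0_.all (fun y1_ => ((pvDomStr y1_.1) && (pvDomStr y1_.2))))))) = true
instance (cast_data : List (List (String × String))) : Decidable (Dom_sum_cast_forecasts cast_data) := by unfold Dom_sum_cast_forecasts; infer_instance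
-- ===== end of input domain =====

-- B keeps only the per-country buckets in the loop and derives the four overall
-- totals by a second pass over the buckets (objective: simpler decomposition, same cost).

-- ===== PORT A =====

-- shared by both ports (the identical try-block lines of both Pythons):
-- int(row.get(k, 0) or 0); none = the except/continue case (ValueError of int())
def pvGetForecast (row : List (String × String)) (k : String) : Option Int :=
  match (PySem.Dict.mk row).get? k with
  | none => some 0
  | some s => if s = "" then some 0 else PySem.Int.ofStr? s

-- the whole try-block: the four parsed fields, or none (→ continue)
def pvParseRow (row : List (String × String)) : Option (Int × Int × Int × Int) :=
  match pvGetForecast row "total_forecast", pvGetForecast row "battles_forecast",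
        pvGetForecast row "erv_forecast", pvGetForecast row "vac_forecast" with
  | some t, some b, some e, some v => some (t, b, e, v)
  | _, _, _, _ => none

-- {"total": 0, "battles": 0, "erv": 0, "vac": 0}
def pvBucket0 : PySem.Dict String Int :=
  PySem.Dict.mk [("total", 0), ("battles", 0), ("erv", 0), ("vac", 0)]

-- one iteration of A's loop over the 5-part state
def pvStepA (st : Int × Int × Int × Int × PySem.Dict String (PySem.Dict String Int))
    (row : List (String × String)) :
    Int × Int × Int × Int × PySem.Dict String (PySem.Dict String Int) :=
  match pvParseRow row with
  | none => st
  | some (t, b, e, v) =>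
    match st with
    | (total, battles, erv, vac, countries) =>
      let c := (PySem.Dict.mk row).getD "country" "Unknown"
      let countries := if countries.contains c then countries else countries.insert c pvBucket0
      -- countries[c]["total"] += t; … : four in-place updates of the nested dict
      let countries := countries.modify c pvBucket0 (fun d => d.modify "total" 0 (· + t))
      let countries := countries.modify c pvBucket0 (fun d => d.modify "battles" 0 (· + b))
      let countries := countries.modify c pvBucket0 (fun d => d.modify "erv" 0 (· + e))
      let countries := countries.modify c pvBucket0 (fun d => d.modify "vac" 0 (· + v))
      (total + t, battles + b, erv + e, vac + v, countries)

def sum_cast_forecasts (cast_data : List (List (String × String))) :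
    Int × Int × Int × Int × (List (String × List (String × Int))) :=
  match cast_data.foldl pvStepA (0, 0, 0, 0, PySem.Dict.empty) with
  | (total, battles, erv, vac, countries) =>
    (total, battles, erv, vac, countries.items.map (fun p => (p.1, p.2.items)))

-- ===== PORT B =====

-- one iteration of B's loop: only the bucket dict is threaded
def pvStepB (countries : PySem.Dict String (PySem.Dict String Int))
    (row : List (String × String)) : PySem.Dict String (PySem.Dict String Int) :=
  match pvParseRow row with
  | none => countries
  | some (t, b, e, v) =>
    let c := (PySem.Dict.mk row).getD "country" "Unknown"
    -- bucket = countries.setdefault(c, {...}); then the four in-place += on bucket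
    (countries.setdefault c pvBucket0).modify c pvBucket0
      (fun d => (((d.modify "total" 0 (· + t)).modify "battles" 0 (· + b)).modify
        "erv" 0 (· + e)).modify "vac" 0 (· + v))

-- sum(b[k] for b in countries.values())  (b[k] ported as getD: exact here, every bucket carries all four keys)
def pvSumField (countries : PySem.Dict String (PySem.Dict String Int)) (k : String) : Int :=
  (countries.values.map (fun d => d.getD k 0)).sum

def sum_cast_forecasts_alt (cast_data : List (List (String × String))) :
    Int × Int × Int × Int × (List (String × List (String × Int))) :=
  let countries := cast_data.foldl pvStepB PySem.Dict.empty
  (pvSumField countries "total", pvSumField countries "battles",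
   pvSumField countries "erv", pvSumField countries "vac",
   countries.items.map (fun p => (p.1, p.2.items)))

-- ===== PRECONDITION & SPEC =====
def Spec_sum_cast_forecasts (cast_data : List (List (String × String))) (out : Int × Int × Int × Int × (List (String × List (String × Int)))) : Prop := out = sum_cast_forecasts_alt cast_data
instance (cast_data : List (List (String × String))) (out : Int × Int × Int × Int × (List (String × List (String × Int)))) : Decidable (Spec_sum_cast_forecasts cast_data out) := by
  unfold Spec_sum_cast_forecasts
  -- infer_instance hits the default synthesis size limit on this nested product; build the same instance by steps
  have h5 : DecidableEq (Int × Int × Int × Int × List (String × List (String × Int))) :=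
    @instDecidableEqProd _ _ _
      (@instDecidableEqProd _ _ _
        (@instDecidableEqProd _ _ _
          (@instDecidableEqProd _ _ _ inferInstance)))
  exact h5 _ _

-- ===== CLAIM (what is proved, stated in full; the proofs are below) =====
def Claim_equal_sum_cast_forecasts : Prop := ∀ (cast_data : List (List (String × String))), Dom_sum_cast_forecasts cast_data → Spec_sum_cast_forecasts cast_data (sum_cast_forecasts cast_data)

-- ===== LEMMAS AND PROOFS =====

-- replacing the unique entry keyed c changes a value-sum by (g new − g old)
theorem pv_sum_map_replace {ν : Type} (l : List (String × ν)) (c : String) (w v : ν)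
    (g : ν → Int) (hnd : (l.map Prod.fst).Nodup) (hm : (c, w) ∈ l) :
    ((l.map (fun p => if p.1 == c then (c, v) else p)).map (fun p => g p.2)).sum
      = (l.map (fun p => g p.2)).sum - g w + g v := by
  induction l with
  | nil => cases hm
  | cons hd tl ih =>
    simp only [List.map_cons, List.nodup_cons] at hnd
    rcases List.mem_cons.mp hm with hm' | hm'
    · subst hm'
      have htl : tl.map (fun p => if p.1 == c then (c, v) else p) = tl := by
        rw [show tl = tl.map id from (List.map_id tl).symm]
        rw [List.map_map]
        apply List.map_congr_left
        intro p hp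
        have hpc : p.1 ≠ c := by
          intro h
          have hmm : p.1 ∈ tl.map Prod.fst := List.mem_map_of_mem (f := Prod.fst) hp
          exact hnd.1 (h ▸ hmm)
        simp [hpc]
      simp only [List.map_cons, beq_self_eq_true, if_true, htl, List.sum_cons]
      ring
    · have hne : (hd.1 == c) = false := by
        have hc : c ∈ tl.map Prod.fst := by
          simpa using List.mem_map_of_mem (f := Prod.fst) hm'
        simp only [beq_eq_false_iff_ne, ne_eq]
        intro h; exact hnd.1 (h ▸ hc)
      simp only [List.map_cons, hne, Bool.false_eq_true, if_false, List.sum_cons]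
      rw [ih hnd.2 hm']
      ring

-- B's dict update changes a field-sum by the delta of that country's bucket
theorem pv_sumField_update (cs : PySem.Dict String (PySem.Dict String Int)) (c : String)
    (F : PySem.Dict String Int → PySem.Dict String Int) (k : String)
    (hnd : cs.keys.Nodup) (hb0 : pvBucket0.getD k 0 = 0) :
    pvSumField ((cs.setdefault c pvBucket0).modify c pvBucket0 F) k
      = pvSumField cs k - (cs.getD c pvBucket0).getD k 0 + (F (cs.getD c pvBucket0)).getD k 0 := by
  by_cases hc : cs.contains c = true
  · rw [PySem.Dict.setdefault_of_contains _ _ hc]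
    obtain ⟨w, hw⟩ : ∃ w, cs.get? c = some w := by
      rcases h : cs.get? c with _ | w
      · rw [PySem.Dict.contains_eq_isSome_get?, h] at hc; simp at hc
      · exact ⟨w, rfl⟩
    have hmem : (c, w) ∈ cs.items := PySem.Dict.mem_items_of_get?_eq_some _ hw
    have hgd : cs.getD c pvBucket0 = w := PySem.Dict.getD_of_get?_eq_some _ _ hw
    unfold PySem.Dict.modify
    rw [hgd]
    unfold pvSumField PySem.Dict.values
    rw [PySem.Dict.items_insert_of_contains _ _ hc]
    rw [List.map_map, List.map_map]
    have := pv_sum_map_replace cs.items c w (F w) (fun d => d.getD k 0) hnd hmem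
    rw [List.map_map] at this
    simpa [Function.comp] using this
  · have hc' : cs.contains c = false := by simpa using hc
    rw [PySem.Dict.setdefault_of_not_contains _ _ hc']
    unfold PySem.Dict.modify
    rw [PySem.Dict.getD_insert_self, PySem.Dict.insert_insert_self,
        PySem.Dict.getD_of_not_contains _ _ hc']
    unfold pvSumField PySem.Dict.values
    rw [PySem.Dict.items_insert_of_not_contains _ _ hc']
    simp [hb0]

-- two in-place updates at the same key compose
theorem pv_modify_modify (d : PySem.Dict String (PySem.Dict String Int)) (c : String)
    (f g : PySem.Dict String Int → PySem.Dict String Int) :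
    (d.modify c pvBucket0 f).modify c pvBucket0 g = d.modify c pvBucket0 (fun x => g (f x)) := by
  unfold PySem.Dict.modify
  rw [PySem.Dict.getD_insert_self, PySem.Dict.insert_insert_self]

-- A's per-row dict update equals B's
theorem pv_dict_step_eq (cs : PySem.Dict String (PySem.Dict String Int)) (c : String)
    (t b e v : Int) :
    ((((if cs.contains c then cs else cs.insert c pvBucket0).modify c pvBucket0
          (fun d => d.modify "total" 0 (· + t))).modify c pvBucket0
          (fun d => d.modify "battles" 0 (· + b))).modify c pvBucket0
          (fun d => d.modify "erv" 0 (· + e))).modify c pvBucket0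
          (fun d => d.modify "vac" 0 (· + v))
      = (cs.setdefault c pvBucket0).modify c pvBucket0
          (fun d => (((d.modify "total" 0 (· + t)).modify "battles" 0 (· + b)).modify
            "erv" 0 (· + e)).modify "vac" 0 (· + v)) := by
  have hsd : cs.setdefault c pvBucket0 = if cs.contains c then cs else cs.insert c pvBucket0 := by
    by_cases hc : cs.contains c = true
    · rw [PySem.Dict.setdefault_of_contains _ _ hc, if_pos hc]
    · have hc' : cs.contains c = false := by simpa using hc
      rw [PySem.Dict.setdefault_of_not_contains _ _ hc', if_neg hc]
  rw [hsd, pv_modify_modify, pv_modify_modify, pv_modify_modify]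

-- after the four +=, field k of the bucket grew by its own delta
theorem pv_bucket_delta (d : PySem.Dict String Int) (t b e v : Int) :
    ∀ k ∈ (["total", "battles", "erv", "vac"] : List String),
    ((((d.modify "total" 0 (· + t)).modify "battles" 0 (· + b)).modify "erv" 0 (· + e)).modify
        "vac" 0 (· + v)).getD k 0
      = d.getD k 0 + (if k = "total" then t else if k = "battles" then b
          else if k = "erv" then e else v) := by
  intro k hk
  fin_cases hk <;> simp [PySem.Dict.getD_modify]

-- nodup keys survive one B step
theorem pv_stepB_nodup (cs : PySem.Dict String (PySem.Dict String Int))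
    (row : List (String × String)) (hnd : cs.keys.Nodup) : (pvStepB cs row).keys.Nodup := by
  unfold pvStepB
  rcases pvParseRow row with _ | ⟨t, b, e, v⟩
  · exact hnd
  · simp only
    have h1 : (cs.setdefault ((PySem.Dict.mk row).getD "country" "Unknown") pvBucket0).keys.Nodup := by
      by_cases hc : cs.contains ((PySem.Dict.mk row).getD "country" "Unknown") = true
      · rw [PySem.Dict.setdefault_of_contains _ _ hc]; exact hnd
      · have hc' : cs.contains ((PySem.Dict.mk row).getD "country" "Unknown") = false := by
          simpa using hc
        rw [PySem.Dict.setdefault_of_not_contains _ _ hc']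
        exact PySem.Dict.nodup_keys_insert _ _ _ hnd
    exact PySem.Dict.nodup_keys_insert _ _ _ h1

-- loop invariant: A's fold, started field-sum-consistent, tracks B's fold
theorem pv_loop_eq (rows : List (List (String × String))) :
    ∀ cs : PySem.Dict String (PySem.Dict String Int), cs.keys.Nodup →
    rows.foldl pvStepA
        (pvSumField cs "total", pvSumField cs "battles", pvSumField cs "erv",
         pvSumField cs "vac", cs)
      = (pvSumField (rows.foldl pvStepB cs) "total",
         pvSumField (rows.foldl pvStepB cs) "battles",
         pvSumField (rows.foldl pvStepB cs) "erv",
         pvSumField (rows.foldl pvStepB cs) "vac",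
         rows.foldl pvStepB cs) := by
  induction rows with
  | nil => intro cs _; simp
  | cons row tl ih =>
    intro cs hnd
    have hstep : pvStepA
        (pvSumField cs "total", pvSumField cs "battles", pvSumField cs "erv",
         pvSumField cs "vac", cs) row
      = (pvSumField (pvStepB cs row) "total", pvSumField (pvStepB cs row) "battles",
         pvSumField (pvStepB cs row) "erv", pvSumField (pvStepB cs row) "vac",
         pvStepB cs row) := by
      unfold pvStepA pvStepB
      rcases pvParseRow row with _ | ⟨t, b, e, v⟩
      · rfl
      · simp only
        rw [pv_dict_step_eq cs ((PySem.Dict.mk row).getD "country" "Unknown") t b e v]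
        set c := (PySem.Dict.mk row).getD "country" "Unknown" with hc
        set F := fun d : PySem.Dict String Int =>
          (((d.modify "total" 0 (· + t)).modify "battles" 0 (· + b)).modify
            "erv" 0 (· + e)).modify "vac" 0 (· + v) with hF
        have hd := pv_bucket_delta (cs.getD c pvBucket0) t b e v
        have ht := pv_sumField_update cs c F "total" hnd (by decide)
        have hb := pv_sumField_update cs c F "battles" hnd (by decide)
        have he := pv_sumField_update cs c F "erv" hnd (by decide)
        have hv := pv_sumField_update cs c F "vac" hnd (by decide)
        rw [hF] at ht hb he hv
        rw [hd "total" (by decide)] at ht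
        rw [hd "battles" (by decide)] at hb
        rw [hd "erv" (by decide)] at he
        rw [hd "vac" (by decide)] at hv
        simp only [if_neg (by decide : ¬("battles" = "total")),
          if_neg (by decide : ¬("erv" = "total")), if_neg (by decide : ¬("erv" = "battles")),
          if_neg (by decide : ¬("vac" = "total")), if_neg (by decide : ¬("vac" = "battles")),
          if_neg (by decide : ¬("vac" = "erv"))] at ht hb he hv
        rw [← hF] at ht hb he hv
        rw [ht, hb, he, hv]
        simp only [if_true]
        ring_nf
    rw [List.foldl_cons, List.foldl_cons, hstep]
    exact ih (pvStepB cs row) (pv_stepB_nodup cs row hnd)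

-- ===== VERDICT (by name: the statement is the Claim_ definition above) =====
theorem sum_cast_forecasts_spec : Claim_equal_sum_cast_forecasts := by
  intro cast_data _
  unfold Spec_sum_cast_forecasts sum_cast_forecasts sum_cast_forecasts_alt
  have := pv_loop_eq cast_data PySem.Dict.empty (by simp [PySem.Dict.keys, PySem.Dict.empty])
  simp only [show ∀ k, pvSumField PySem.Dict.empty k = 0 from fun _ => rfl] at this
  rw [this]
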